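-- pv_equiv track=rewrite | github.com/avoevodin/otus_python_basic_samples | day_30_django_generics/zoo/test.py | decrease_bin_num
-- ===== SOURCE A (Python) =====
-- def decrease_bin_num(b_num):
--     i = len(b_num) - 2
--     tail = 1
--     while i > -1 and tail > 0:
--         b = b_num[i]
--         if b == 1:
--             b_num[i] = 0
--             tail = 1
--         else:
--             b_num[i] = 1
--             tail -= 1
--
--         if i == 0 and tail == 1:
--             b_num.insert(0, 1)
--
--         i -= 1
--     return b_num
-- ===== SOURCE B (Python) =====
-- def decrease_bin_num(b_num):
--     # Count trailing ones of the prefix, then rebuild it with one slice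
--     # assignment (same in-place mutation and return object as A).
--     n = len(b_num) - 1
--     if n < 1:
--         return b_num
--     prefix = b_num[:n]
--     ones = 0
--     for x in reversed(prefix):
--         if x != 1:
--             break
--         ones += 1
--     if ones == n:
--         new_prefix = [1] + [0] * n
--     else:
--         new_prefix = prefix[: n - ones - 1] + [1] + [0] * ones
--     b_num[:n] = new_prefix
--     return b_num
-- ===== Notes on version B (the rewrite author's own statement) =====
-- stated objective: simpler
-- what changed: Replaces A's element-by-element carry loop with mid-loop mutation and insert by counting the trailing ones of the prefix and rebuilding the prefix in one slice assignment (kept prefix + [1] + zeros, or [1] + zeros on overflow).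
import Mathlib
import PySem

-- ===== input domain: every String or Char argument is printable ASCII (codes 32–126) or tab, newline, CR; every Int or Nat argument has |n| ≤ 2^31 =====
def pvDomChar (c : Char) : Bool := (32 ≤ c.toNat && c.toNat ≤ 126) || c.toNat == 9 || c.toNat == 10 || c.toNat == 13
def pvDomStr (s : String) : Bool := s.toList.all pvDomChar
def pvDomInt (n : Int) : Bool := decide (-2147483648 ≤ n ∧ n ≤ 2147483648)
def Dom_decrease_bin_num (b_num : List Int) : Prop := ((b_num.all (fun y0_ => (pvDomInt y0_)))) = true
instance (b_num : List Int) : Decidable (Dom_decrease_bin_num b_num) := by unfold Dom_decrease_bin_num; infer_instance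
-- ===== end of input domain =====

-- B replaces A's per-bit carry loop (in-place writes plus a mid-loop insert) with
-- counting the trailing ones of the prefix and one bulk rebuild of the prefix: a
-- simpler decomposition, same O(n) cost; equivalence is about the return value
-- (both Pythons also mutate the argument list identically).


-- ===== PORT A =====
-- the while loop; i only ever indexes positions 0..len-2, so the reads/writes are
-- in range and pyGetD/pySetD are exact there
def decrease_bin_num_loop (xs : List Int) (i tail : Int) : List Int :=
  if _h : i > -1 ∧ tail > 0 then
    let b := PySem.List.pyGetD xs i 0
    let xs1 := if b = 1 then PySem.List.pySetD xs i 0 else PySem.List.pySetD xs i 1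
    let tail1 := if b = 1 then (1 : Int) else tail - 1
    let xs2 := if i = 0 ∧ tail1 = 1 then PySem.List.insert xs1 0 1 else xs1
    decrease_bin_num_loop xs2 (i - 1) tail1
  else xs
termination_by (i + 1).toNat
decreasing_by omega

def decrease_bin_num (b_num : List Int) : List Int :=
  decrease_bin_num_loop b_num ((b_num.length : Int) - 2) 1

-- ===== PORT B =====
-- the 'for x in reversed(prefix): if x != 1: break; ones += 1' loop
def decrease_bin_num_countOnes (rev : List Int) : Int :=
  match rev with
  | [] => 0
  | x :: r => if x ≠ 1 then 0 else decrease_bin_num_countOnes r + 1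

def decrease_bin_num_alt (b_num : List Int) : List Int :=
  let n : Int := (b_num.length : Int) - 1
  if n < 1 then b_num
  else
    let pfx := PySem.List.slice b_num none (some n)
    let ones := decrease_bin_num_countOnes pfx.reverse
    let newPrefix :=
      if ones = n then 1 :: List.replicate n.toNat 0    -- [1] + [0] * n
      else PySem.List.slice pfx none (some (n - ones - 1)) ++ [1] ++ List.replicate ones.toNat 0
    newPrefix ++ PySem.List.slice b_num (some n) none   -- b_num[:n] = new_prefix

-- ===== PRECONDITION & SPEC =====
def Spec_decrease_bin_num (b_num : List Int) (out : List Int) : Prop := out = decrease_bin_num_alt b_num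
instance (b_num : List Int) (out : List Int) : Decidable (Spec_decrease_bin_num b_num out) := by unfold Spec_decrease_bin_num; infer_instance

-- ===== CLAIM (what is proved, stated in full; the proofs are below) =====
def Claim_equal_decrease_bin_num : Prop := ∀ (b_num : List Int), Dom_decrease_bin_num b_num → Spec_decrease_bin_num b_num (decrease_bin_num b_num)

-- ===== LEMMAS AND PROOFS =====

-- common specification: increment of the reversed prefix (LSB first)
def pvInc (rev : List Int) : List Int :=
  match rev with
  | [] => [1]
  | x :: r => if x = 1 then 0 :: pvInc r else 1 :: r

theorem countOnes_bounds (rev : List Int) :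
    0 ≤ decrease_bin_num_countOnes rev ∧ decrease_bin_num_countOnes rev ≤ (rev.length : Int) := by
  induction rev with
  | nil => simp [decrease_bin_num_countOnes]
  | cons x r ih =>
      by_cases hx : x = 1 <;> simp [decrease_bin_num_countOnes, hx] <;> omega

-- countOnes counts the leading ones of rev; pvInc zeroes them and flips the next bit
theorem countOnes_spec (rev : List Int) :
    pvInc rev = List.replicate (decrease_bin_num_countOnes rev).toNat 0 ++
      (if decrease_bin_num_countOnes rev = (rev.length : Int) then [1]
       else 1 :: rev.drop ((decrease_bin_num_countOnes rev).toNat + 1)) := by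
  induction rev with
  | nil => simp [decrease_bin_num_countOnes, pvInc]
  | cons x r ih =>
      by_cases hx : x = 1
      · subst hx
        have hb := countOnes_bounds r
        have hco : decrease_bin_num_countOnes ((1:Int) :: r) = decrease_bin_num_countOnes r + 1 := by
          simp [decrease_bin_num_countOnes]
        rw [show pvInc ((1:Int) :: r) = 0 :: pvInc r from by simp [pvInc], ih, hco]
        have h1 : (decrease_bin_num_countOnes r + 1).toNat
            = (decrease_bin_num_countOnes r).toNat + 1 := by omega
        rw [h1, List.replicate_succ]
        by_cases hc : decrease_bin_num_countOnes r = (r.length : Int)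
        · rw [if_pos hc, if_pos (by rw [List.length_cons]; push_cast; omega)]
          simp
        · rw [if_neg hc, if_neg (by rw [List.length_cons]; push_cast; omega)]
          simp [List.drop_succ_cons]
      · have hco : decrease_bin_num_countOnes (x :: r) = 0 := by
          simp [decrease_bin_num_countOnes, hx]
        rw [show pvInc (x :: r) = 1 :: r from by simp [pvInc, hx], hco]
        rw [if_neg (by rw [List.length_cons]; push_cast; omega)]
        simp

-- A's loop, started at the last index of q ++ [x], computes pvInc of the reversed prefix
theorem loopA_eq_inc (q : List Int) : ∀ (x : Int) (t : List Int),
    decrease_bin_num_loop (q ++ x :: t) (q.length : Int) 1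
      = (pvInc ((q ++ [x]).reverse)).reverse ++ t := by
  induction q using List.reverseRecOn with
  | nil =>
      intro x t
      rw [decrease_bin_num_loop, dif_pos (by norm_num)]
      have hget : PySem.List.pyGetD (x :: t) ((0 : Nat) : Int) 0 = x := by
        rw [PySem.List.pyGetD_natCast]; rfl
      have hset0 : PySem.List.pySetD (x :: t) ((0 : Nat) : Int) (0:Int) = 0 :: t := by
        rw [PySem.List.pySetD_natCast]; rfl
      have hset1 : PySem.List.pySetD (x :: t) ((0 : Nat) : Int) (1:Int) = 1 :: t := by
        rw [PySem.List.pySetD_natCast]; rfl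
      simp only [List.nil_append, List.length_nil, Nat.cast_zero] at hget hset0 hset1 ⊢
      by_cases hx : x = 1
      · simp only [hget, if_pos hx, hset0]
        rw [if_pos (by norm_num), PySem.List.insert_zero]
        rw [decrease_bin_num_loop, dif_neg (by norm_num)]
        simp [pvInc, hx]
      · simp only [hget, if_neg hx, hset1]
        rw [if_neg (by norm_num)]
        rw [decrease_bin_num_loop, dif_neg (by norm_num)]
        simp [pvInc, hx]
  | append_singleton q' y ih =>
      intro x t
      have hget : PySem.List.pyGetD ((q' ++ [y]) ++ x :: t) (((q' ++ [y]).length : Nat) : Int) 0 = x := by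
        rw [PySem.List.pyGetD_natCast]; simp [List.getD]
      have hset : ∀ v : Int, PySem.List.pySetD ((q' ++ [y]) ++ x :: t) (((q' ++ [y]).length : Nat) : Int) v
          = (q' ++ [y]) ++ v :: t := by
        intro v; rw [PySem.List.pySetD_natCast]; simp
      have hstep : (((q' ++ [y]).length : Nat) : Int) - 1 = (q'.length : Int) := by
        rw [List.length_append, List.length_cons, List.length_nil]; push_cast; ring
      have hne0 : ¬ ((((q' ++ [y]).length : Nat) : Int) = 0) := by
        rw [List.length_append, List.length_cons, List.length_nil]; push_cast; omega
      rw [decrease_bin_num_loop, dif_pos (by norm_num)]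
      simp only [hget, hset]
      split_ifs with h1 h2 h2
      · exact absurd h2.1 hne0
      · have hlist : (q' ++ [y]) ++ (0:Int) :: t = q' ++ y :: (0 :: t) := by simp
        rw [hstep, hlist, ih y (0 :: t)]
        simp [pvInc, h1]
      · exact absurd h2.2 (by norm_num)
      · rw [decrease_bin_num_loop, dif_neg (by norm_num)]
        simp [pvInc, h1]

-- B on a nonempty prefix: rebuild the prefix = reversed pvInc of the reversed prefix
theorem altB_big (p : List Int) (z : Int) (hp : p ≠ []) :
    decrease_bin_num_alt (p ++ [z]) = (pvInc p.reverse).reverse ++ [z] := by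
  have hp1 : 1 ≤ p.length := List.length_pos_of_ne_nil hp
  have hb := countOnes_bounds p.reverse
  simp only [decrease_bin_num_alt]
  have hlen : ((p ++ [z]).length : Int) - 1 = (p.length : Int) := by
    rw [List.length_append, List.length_cons, List.length_nil]; push_cast; ring
  rw [hlen, if_neg (by omega)]
  rw [PySem.List.slice_to (p ++ [z]) (by omega), PySem.List.slice_from (p ++ [z]) (by omega)]
  simp only [Int.toNat_natCast, List.take_left, List.drop_left]
  rw [countOnes_spec p.reverse]
  simp only [List.length_reverse] at *
  by_cases hcn : decrease_bin_num_countOnes p.reverse = (p.length : Int)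
  · rw [if_pos hcn, if_pos hcn]
    have hnat : (decrease_bin_num_countOnes p.reverse).toNat = p.length := by omega
    rw [hnat]
    simp
  · rw [if_neg hcn, if_neg hcn]
    rw [PySem.List.slice_to p (by omega)]
    have hdr : (p.reverse.drop ((decrease_bin_num_countOnes p.reverse).toNat + 1)).reverse
        = p.take (p.length - ((decrease_bin_num_countOnes p.reverse).toNat + 1)) := by
      rw [List.reverse_drop]; simp
    have hidx : p.length - ((decrease_bin_num_countOnes p.reverse).toNat + 1)
        = ((p.length : Int) - decrease_bin_num_countOnes p.reverse - 1).toNat := by omega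
    rw [hidx] at hdr
    simp [hdr]

-- ===== VERDICT (by name: the statement is the Claim_ definition above) =====
theorem decrease_bin_num_spec : Claim_equal_decrease_bin_num := by
  intro b_num _
  unfold Spec_decrease_bin_num decrease_bin_num
  by_cases hlen : b_num.length ≤ 1
  · rw [decrease_bin_num_loop, dif_neg (by omega)]
    simp only [decrease_bin_num_alt]
    rw [if_pos (by omega)]
  · replace hlen : 1 < b_num.length := by omega
    have hne : b_num ≠ [] := by intro h; simp [h] at hlen
    obtain ⟨p, z, hpz⟩ : ∃ p z, b_num = p ++ [z] :=
      ⟨b_num.dropLast, b_num.getLast hne, (List.dropLast_append_getLast hne).symm⟩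
    have hpne : p ≠ [] := by
      intro h; rw [hpz, h] at hlen; simp at hlen
    obtain ⟨q, x, hqx⟩ : ∃ q x, p = q ++ [x] :=
      ⟨p.dropLast, p.getLast hpne, (List.dropLast_append_getLast hpne).symm⟩
    subst hqx; subst hpz
    have hi : (((q ++ [x]) ++ [z]).length : Int) - 2 = (q.length : Int) := by
      simp only [List.length_append, List.length_cons, List.length_nil]; push_cast; ring
    have hlist : (q ++ [x]) ++ [z] = q ++ x :: [z] := by simp
    rw [hi, hlist, loopA_eq_inc q x [z], ← hlist, altB_big (q ++ [x]) z (by simp)]
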